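-- pv_equiv track=rewrite | github.com/francojreyes/advent-of-code | 2022/day21/solution.py | depends_on_humn
-- ===== SOURCE A (Python) =====
-- def depends_on_humn(monkey, dependencies):
--     if monkey == "humn":
--         return True
--
--     if monkey not in dependencies:
--         return False
--
--     lhs, rhs = dependencies[monkey]
--     if lhs == "humn" or rhs == "humn":
--         return True
--
--     return depends_on_humn(lhs, dependencies) or depends_on_humn(rhs, dependencies)
-- ===== SOURCE B (Python) =====
-- def depends_on_humn(monkey, dependencies):
--     # Level-wise saturation: compute the set of names reachable from monkey
--     # (each dependency entry contributes two outgoing edges), then test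
--     # whether "humn" was reached.  No recursion, no short-circuiting.
--     reached = {monkey}
--     for _ in range(len(dependencies)):
--         nxt = set(reached)
--         for node in reached:
--             if node in dependencies:
--                 lhs, rhs = dependencies[node]
--                 nxt.add(lhs)
--                 nxt.add(rhs)
--         reached = nxt
--     return "humn" in reached
-- ===== Notes on version B (the rewrite author's own statement) =====
-- stated objective: alternative
-- what changed: Recursive short-circuiting DFS is replaced by iterative level-wise saturation: build the set of names reachable from monkey by expanding it len(dependencies) times, then test membership of 'humn'; B also terminates (returning reachability of 'humn') on the cyclic inputs where A's recursion overflows, which Pre_ excludes exactly.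
import Mathlib
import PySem

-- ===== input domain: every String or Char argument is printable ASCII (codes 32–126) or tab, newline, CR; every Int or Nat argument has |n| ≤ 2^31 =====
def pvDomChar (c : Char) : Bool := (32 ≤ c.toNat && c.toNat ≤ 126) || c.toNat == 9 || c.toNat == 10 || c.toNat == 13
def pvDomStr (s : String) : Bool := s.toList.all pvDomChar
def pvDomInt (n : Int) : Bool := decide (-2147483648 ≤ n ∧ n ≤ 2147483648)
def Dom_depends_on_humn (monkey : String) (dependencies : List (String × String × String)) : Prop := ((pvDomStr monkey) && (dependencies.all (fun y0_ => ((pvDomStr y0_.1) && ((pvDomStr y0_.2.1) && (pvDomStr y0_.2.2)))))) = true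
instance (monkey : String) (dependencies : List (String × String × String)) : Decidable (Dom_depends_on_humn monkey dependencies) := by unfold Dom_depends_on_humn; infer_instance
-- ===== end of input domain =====

-- B replaces A's recursive short-circuiting DFS by iterative level-wise saturation of the
-- reachable-name set followed by a membership test ('alternative': different algorithm, similar cost).


-- ===== PORT A =====
-- A's recursion is on the dependency graph, which may be cyclic, so the Lean port carries a
-- fuel argument used ONLY for termination; fuel dependencies.length + 1 never runs out on the
-- inputs Pre_ admits (on a terminating run of A no name repeats on the call stack, so the
-- recursion depth is at most the number of distinct keys).
-- 'monkey not in dependencies' + 'dependencies[monkey]' are together one first-match lookup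
-- on the association list (dict convention).
def dependsOnHumnFuel (dependencies : List (String × String × String)) : Nat → String → Bool
  | 0, _ => false
  | fuel + 1, monkey =>
    if monkey == "humn" then true
    else
      match (dependencies.find? (fun p => p.1 == monkey)).map (·.2) with
      | none => false
      | some (lhs, rhs) =>
        if lhs == "humn" || rhs == "humn" then true
        else dependsOnHumnFuel dependencies fuel lhs || dependsOnHumnFuel dependencies fuel rhs

def depends_on_humn (monkey : String) (dependencies : List (String × String × String)) : Bool :=
  dependsOnHumnFuel dependencies (dependencies.length + 1) monkey

-- ===== PORT B =====
-- one round of 'nxt = set(reached); for node in reached: if node in dependencies: add both children'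
def saturateStep (dependencies : List (String × String × String))
    (reached : PySem.Set String) : PySem.Set String :=
  reached.foldl (fun nxt node =>
    match (dependencies.find? (fun p => p.1 == node)).map (·.2) with
    | none => nxt
    | some (lhs, rhs) => PySem.Set.add (PySem.Set.add nxt lhs) rhs) reached

def depends_on_humn_alt (monkey : String) (dependencies : List (String × String × String)) : Bool :=
  let reached := PySem.Set.ofList [monkey]
  let final := (List.range dependencies.length).foldl (fun r _ => saturateStep dependencies r) reached
  PySem.Set.contains final "humn"

-- ===== PRECONDITION & SPEC =====
-- Pre_ excludes EXACTLY the inputs on which Python A does not return (infinite recursion,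
-- surfacing as RecursionError).  It is a condition on the SHAPE of the input graph, decided by
-- bounded path searches over the input's key->children edges ("is t reachable from x", "does
-- key k lie on a cycle"); no helper below computes a return value of either program, and the
-- fuel is only the trivial bound |dependencies| on the length of a simple path.  A's DFS explores: from a visited key x (x ≠ "humn", neither child "humn")
-- it always descends into lhs, and descends into rhs exactly when the lhs subtree evaluates to
-- False — which happens precisely when "humn" is not plainly reachable from lhs and no plainly
-- reachable key of lhs lies on a cycle.  A diverges iff this explored subgraph, followed from
-- monkey, reaches a cycle.  All conditions below are plain bounded reachability searches over
-- the input graph (a simple path visits distinct keys, so fuel = dependencies.length suffices);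
-- no return value of either program is computed.

-- "t is reachable from x in at most `fuel` child-edge steps" (plain graph: key -> both children)
def pvReach (dependencies : List (String × String × String)) : Nat → String → String → Bool
  | 0, x, t => x == t
  | fuel + 1, x, t =>
    x == t ||
      match (dependencies.find? (fun p => p.1 == x)).map (·.2) with
      | none => false
      | some (lhs, rhs) => pvReach dependencies fuel lhs t || pvReach dependencies fuel rhs t

-- key k lies on a plain cycle
def pvCycAt (dependencies : List (String × String × String)) (k : String) : Bool :=
  match (dependencies.find? (fun p => p.1 == k)).map (·.2) with
  | none => false
  | some (lhs, rhs) =>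
    pvReach dependencies dependencies.length lhs k || pvReach dependencies dependencies.length rhs k

-- some key on a plain cycle is plainly reachable from x
def pvBadFrom (dependencies : List (String × String × String)) (x : String) : Bool :=
  dependencies.any (fun p => pvReach dependencies dependencies.length x p.1 && pvCycAt dependencies p.1)

-- A's call on y terminates and returns False: "humn" not plainly reachable, no reachable cycle
def pvFalseNode (dependencies : List (String × String × String)) (y : String) : Bool :=
  !pvReach dependencies dependencies.length y "humn" && !pvBadFrom dependencies y

-- reachability along the edges A's DFS actually traverses
def pvGReach (dependencies : List (String × String × String)) : Nat → String → String → Bool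
  | 0, x, t => x == t
  | fuel + 1, x, t =>
    x == t ||
      (if x == "humn" then false
       else
         match (dependencies.find? (fun p => p.1 == x)).map (·.2) with
         | none => false
         | some (lhs, rhs) =>
           if lhs == "humn" || rhs == "humn" then false
           else pvGReach dependencies fuel lhs t ||
                (pvFalseNode dependencies lhs && pvGReach dependencies fuel rhs t))

-- key k lies on a cycle of A's explored subgraph
def pvGCycAt (dependencies : List (String × String × String)) (k : String) : Bool :=
  if k == "humn" then false
  else
    match (dependencies.find? (fun p => p.1 == k)).map (·.2) with
    | none => false
    | some (lhs, rhs) =>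
      if lhs == "humn" || rhs == "humn" then false
      else pvGReach dependencies dependencies.length lhs k ||
           (pvFalseNode dependencies lhs && pvGReach dependencies dependencies.length rhs k)

-- A's DFS from monkey reaches a cycle of its explored subgraph (= A raises RecursionError)
def pvDiverges (monkey : String) (dependencies : List (String × String × String)) : Bool :=
  dependencies.any (fun p =>
    pvGReach dependencies dependencies.length monkey p.1 && pvGCycAt dependencies p.1)

-- Pre_ excludes exactly the inputs on which A's recursion is infinite (Python raises
-- RecursionError there); on every input where A returns a value, Pre_ holds.
def Pre_depends_on_humn (monkey : String) (dependencies : List (String × String × String)) : Prop :=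
  pvDiverges monkey dependencies = false

instance (monkey : String) (dependencies : List (String × String × String)) : Decidable (Pre_depends_on_humn monkey dependencies) := by
  unfold Pre_depends_on_humn; infer_instance

def pvWitness_depends_on_humn : String × (List (String × String × String)) :=
  ("root", [("root", ("a", "humn")), ("a", ("b", "c"))])

def Spec_depends_on_humn (monkey : String) (dependencies : List (String × String × String)) (out : Bool) : Prop := out = depends_on_humn_alt monkey dependencies
instance (monkey : String) (dependencies : List (String × String × String)) (out : Bool) : Decidable (Spec_depends_on_humn monkey dependencies out) := by unfold Spec_depends_on_humn; infer_instance

-- ===== CLAIM (what is proved, stated in full; the proofs are below) =====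
def Claim_equal_depends_on_humn : Prop := ∀ (monkey : String) (dependencies : List (String × String × String)), Dom_depends_on_humn monkey dependencies → Pre_depends_on_humn monkey dependencies → Spec_depends_on_humn monkey dependencies (depends_on_humn monkey dependencies)


-- ===== LEMMAS AND PROOFS =====

-- one directed edge of the dependency graph
def DepEdge (dependencies : List (String × String × String)) (a b : String) : Prop :=
  ∃ lhs rhs, (dependencies.find? (fun p => p.1 == a)).map (·.2) = some (lhs, rhs) ∧ (b = lhs ∨ b = rhs)

-- a path a → … → c whose list of edge sources is xs
inductive DepChain (dependencies : List (String × String × String)) : String → String → List String → Prop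
  | nil (a : String) : DepChain dependencies a a []
  | cons {a b c : String} {xs : List String} :
      DepEdge dependencies a b → DepChain dependencies b c xs → DepChain dependencies a c (a :: xs)

-- ---- facts about port A ----

theorem dependsOnHumnFuel_mono (dependencies : List (String × String × String)) :
    ∀ {f f' : Nat} {m : String}, f ≤ f' →
      dependsOnHumnFuel dependencies f m = true → dependsOnHumnFuel dependencies f' m = true := by
  intro f
  induction f with
  | zero => intro f' m _ h; simp [dependsOnHumnFuel] at h
  | succ f ih =>
    intro f' m hle h
    obtain ⟨f'', rfl⟩ : ∃ f'', f' = f'' + 1 := ⟨f' - 1, by omega⟩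
    by_cases hm : m = "humn"
    · simp [dependsOnHumnFuel, hm]
    · cases hf : (dependencies.find? (fun p => p.1 == m)).map (·.2) with
      | none => rw [dependsOnHumnFuel, hf] at h; simp [hm] at h
      | some pr =>
        obtain ⟨lhs, rhs⟩ := pr
        rw [dependsOnHumnFuel, hf] at h
        rw [dependsOnHumnFuel, hf]
        by_cases hh : lhs = "humn" ∨ rhs = "humn"
        · simp [hm, hh]
        · simp only [not_or] at hh
          simp [hm, hh.1, hh.2] at h ⊢
          rcases h with h1 | h1
          · exact Or.inl (ih (by omega) h1)
          · exact Or.inr (ih (by omega) h1)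

theorem dependsOnHumnFuel_sound (dependencies : List (String × String × String)) :
    ∀ (f : Nat) (m : String), dependsOnHumnFuel dependencies f m = true →
      ∃ xs, DepChain dependencies m "humn" xs := by
  intro f
  induction f with
  | zero => intro m h; simp [dependsOnHumnFuel] at h
  | succ f ih =>
    intro m h
    by_cases hm : m = "humn"
    · exact ⟨[], hm ▸ DepChain.nil m⟩
    · cases hf : (dependencies.find? (fun p => p.1 == m)).map (·.2) with
      | none => rw [dependsOnHumnFuel, hf] at h; simp [hm] at h
      | some pr =>
        obtain ⟨lhs, rhs⟩ := pr
        rw [dependsOnHumnFuel, hf] at h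
        by_cases hh : lhs = "humn" ∨ rhs = "humn"
        · refine ⟨[m], DepChain.cons ⟨lhs, rhs, hf, ?_⟩ (DepChain.nil _)⟩
          rcases hh with h1 | h1
          · exact Or.inl h1.symm
          · exact Or.inr h1.symm
        · simp only [not_or] at hh
          simp [hm, hh.1, hh.2] at h
          rcases h with h1 | h1
          · obtain ⟨xs, hc⟩ := ih lhs h1
            exact ⟨m :: xs, DepChain.cons ⟨lhs, rhs, hf, Or.inl rfl⟩ hc⟩
          · obtain ⟨xs, hc⟩ := ih rhs h1
            exact ⟨m :: xs, DepChain.cons ⟨lhs, rhs, hf, Or.inr rfl⟩ hc⟩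

theorem dependsOnHumnFuel_complete (dependencies : List (String × String × String))
    {m c : String} {xs : List String} (h : DepChain dependencies m c xs) (hc : c = "humn") :
    dependsOnHumnFuel dependencies (xs.length + 1) m = true := by
  induction h with
  | nil a => simp [dependsOnHumnFuel, hc]
  | @cons a b c ys e ch ih =>
    obtain ⟨lhs, rhs, hf, hb⟩ := e
    by_cases hm : a = "humn"
    · simp [dependsOnHumnFuel, hm]
    · rw [dependsOnHumnFuel, hf]
      by_cases hh : lhs = "humn" ∨ rhs = "humn"
      · simp [hm, hh]
      · simp only [not_or] at hh
        simp [hm, hh.1, hh.2]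
        rcases hb with rfl | rfl
        · exact Or.inl (ih hc)
        · exact Or.inr (ih hc)

-- ---- chain surgery: from any chain, a duplicate-free one over the same elements ----

theorem depChain_suffix (dependencies : List (String × String × String)) :
    ∀ {a c : String} {zs : List String}, DepChain dependencies a c zs → ∀ {x}, x ∈ zs →
      ∃ ys, DepChain dependencies x c (x :: ys) ∧ (x :: ys).length ≤ zs.length ∧ (x :: ys) ⊆ zs := by
  intro a c zs h
  induction h with
  | nil a => intro x hx; simp at hx
  | @cons a b c ys e ch ih =>
    intro x hx
    rcases List.mem_cons.mp hx with rfl | hx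
    · exact ⟨ys, DepChain.cons e ch, le_refl _, List.Subset.refl _⟩
    · obtain ⟨ws, hch, hlen, hsub⟩ := ih hx
      exact ⟨ws, hch, Nat.le_succ_of_le hlen, fun y hy => List.mem_cons_of_mem _ (hsub hy)⟩

theorem depChain_nodup (dependencies : List (String × String × String)) :
    ∀ (n : Nat) {a c : String} {zs : List String}, zs.length ≤ n → DepChain dependencies a c zs →
      ∃ ys, DepChain dependencies a c ys ∧ ys.Nodup ∧ ys ⊆ zs := by
  intro n
  induction n with
  | zero =>
    intro a c zs hlen h
    cases h with
    | nil => exact ⟨[], DepChain.nil _, List.nodup_nil, by simp⟩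
    | cons e ch => simp at hlen
  | succ n ih =>
    intro a c zs hlen h
    cases h with
    | nil => exact ⟨[], DepChain.nil _, List.nodup_nil, by simp⟩
    | @cons a b c xs e ch =>
      by_cases hmem : a ∈ xs
      · obtain ⟨ys, hch, hlen2, hsub⟩ := depChain_suffix dependencies ch hmem
        obtain ⟨ws, hw, hnd, hsubw⟩ := ih (by simp only [List.length_cons] at hlen; omega) hch
        exact ⟨ws, hw, hnd, fun y hy => List.mem_cons_of_mem _ (hsub (hsubw hy))⟩
      · obtain ⟨ws, hw, hnd, hsubw⟩ := ih (by simp only [List.length_cons] at hlen; omega) ch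
        refine ⟨a :: ws, DepChain.cons e hw, List.nodup_cons.mpr ⟨fun hc => hmem (hsubw hc), hnd⟩, ?_⟩
        intro y hy
        rcases List.mem_cons.mp hy with rfl | hy
        · exact List.mem_cons_self
        · exact List.mem_cons_of_mem _ (hsubw hy)

theorem depChain_keys (dependencies : List (String × String × String)) :
    ∀ {a c : String} {zs : List String}, DepChain dependencies a c zs →
      ∀ x ∈ zs, x ∈ dependencies.map (·.1) := by
  intro a c zs h
  induction h with
  | nil a => intro x hx; simp at hx
  | @cons a b c ys e ch ih =>
    intro x hx
    rcases List.mem_cons.mp hx with rfl | hx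
    · obtain ⟨lhs, rhs, hf, _⟩ := e
      obtain ⟨q, hq, _⟩ := Option.map_eq_some_iff.mp hf
      have hpq := List.find?_some hq
      simp only [beq_iff_eq] at hpq
      exact List.mem_map.mpr ⟨q, List.mem_of_find?_eq_some hq, hpq⟩
    · exact ih x hx

theorem depChain_short (dependencies : List (String × String × String))
    {a c : String} {zs : List String} (h : DepChain dependencies a c zs) :
    ∃ ys, DepChain dependencies a c ys ∧ ys.length ≤ dependencies.length := by
  obtain ⟨ys, hch, hnd, _⟩ := depChain_nodup dependencies zs.length (le_refl _) h
  refine ⟨ys, hch, ?_⟩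
  have hsub : ys ⊆ dependencies.map (·.1) := fun x hx => depChain_keys dependencies hch x hx
  calc ys.length = ys.toFinset.card := (List.toFinset_card_of_nodup hnd).symm
    _ ≤ (dependencies.map (·.1)).toFinset.card := by
        apply Finset.card_le_card
        intro x hx
        exact List.mem_toFinset.mpr (hsub (List.mem_toFinset.mp hx))
    _ ≤ (dependencies.map (·.1)).length := List.toFinset_card_le _
    _ = dependencies.length := List.length_map ..

-- ---- facts about port B ----

theorem mem_foldl_addChildren (dependencies : List (String × String × String)) :
    ∀ (l : List String) (acc : List String) (x : String),
      (x ∈ l.foldl (fun nxt node =>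
          match (dependencies.find? (fun p => p.1 == node)).map (·.2) with
          | none => nxt
          | some (lhs, rhs) => PySem.Set.add (PySem.Set.add nxt lhs) rhs) acc)
        ↔ x ∈ acc ∨ ∃ n ∈ l, DepEdge dependencies n x := by
  intro l
  induction l with
  | nil => intro acc x; simp
  | cons n l ih =>
    intro acc x
    rw [List.foldl_cons, ih]
    have hstep : (x ∈ (match (dependencies.find? (fun p => p.1 == n)).map (·.2) with
          | none => acc
          | some (lhs, rhs) => PySem.Set.add (PySem.Set.add acc lhs) rhs))
        ↔ x ∈ acc ∨ DepEdge dependencies n x := by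
      cases hf : (dependencies.find? (fun p => p.1 == n)).map (·.2) with
      | none => simp [DepEdge, hf]
      | some pr =>
        obtain ⟨u, v⟩ := pr
        simp [DepEdge, hf, PySem.Set.mem_add]
        tauto
    rw [hstep]
    simp only [List.mem_cons]
    constructor
    · rintro ((h | h) | ⟨n', hn', e⟩)
      · exact Or.inl h
      · exact Or.inr ⟨n, Or.inl rfl, h⟩
      · exact Or.inr ⟨n', Or.inr hn', e⟩
    · rintro (h | ⟨n', (rfl | hn'), e⟩)
      · exact Or.inl (Or.inl h)
      · exact Or.inl (Or.inr e)
      · exact Or.inr ⟨n', hn', e⟩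

theorem mem_saturateStep (dependencies : List (String × String × String))
    (S : PySem.Set String) (x : String) :
    x ∈ saturateStep dependencies S ↔ x ∈ S ∨ ∃ n ∈ S, DepEdge dependencies n x := by
  exact mem_foldl_addChildren dependencies S S x

theorem foldl_range_iterate {α : Type} (g : α → α) (S : α) (n : Nat) :
    (List.range n).foldl (fun r _ => g r) S = g^[n] S := by
  induction n with
  | zero => simp
  | succ n ih => rw [List.range_succ, List.foldl_append, ih, List.foldl_cons, List.foldl_nil,
      Function.iterate_succ_apply']

theorem mem_iterate_of_mem (dependencies : List (String × String × String)) :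
    ∀ (k : Nat) (S : PySem.Set String) {y : String}, y ∈ S →
      y ∈ (saturateStep dependencies)^[k] S := by
  intro k
  induction k with
  | zero => intro S y hy; simpa using hy
  | succ k ih =>
    intro S y hy
    rw [Function.iterate_succ_apply]
    exact ih _ ((mem_saturateStep dependencies S y).mpr (Or.inl hy))

theorem depChain_snoc (dependencies : List (String × String × String)) :
    ∀ {a b c : String} {xs : List String}, DepChain dependencies a b xs →
      DepEdge dependencies b c → DepChain dependencies a c (xs ++ [b]) := by
  intro a b c xs h
  induction h with
  | nil a => intro e; exact DepChain.cons e (DepChain.nil _)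
  | cons e' ch ih => intro e; exact DepChain.cons e' (ih e)

theorem iterate_sound (dependencies : List (String × String × String)) (m : String) :
    ∀ (k : Nat) (S : PySem.Set String),
      (∀ y ∈ S, ∃ xs, DepChain dependencies m y xs) →
      ∀ x ∈ (saturateStep dependencies)^[k] S, ∃ xs, DepChain dependencies m x xs := by
  intro k
  induction k with
  | zero => intro S hS x hx; exact hS x (by simpa using hx)
  | succ k ih =>
    intro S hS x hx
    rw [Function.iterate_succ_apply] at hx
    refine ih _ ?_ x hx
    intro y hy
    rcases (mem_saturateStep dependencies S y).mp hy with h | ⟨n, hn, e⟩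
    · exact hS y h
    · obtain ⟨xs, hc⟩ := hS n hn
      exact ⟨xs ++ [n], depChain_snoc dependencies hc e⟩

theorem iterate_complete (dependencies : List (String × String × String)) :
    ∀ {a c : String} {xs : List String}, DepChain dependencies a c xs →
      ∀ (S : PySem.Set String) (k : Nat), a ∈ S → xs.length ≤ k →
        c ∈ (saturateStep dependencies)^[k] S := by
  intro a c xs h
  induction h with
  | nil a => intro S k hS _; exact mem_iterate_of_mem dependencies k S hS
  | @cons a b c ys e ch ih =>
    intro S k hS hlen
    obtain ⟨k', rfl⟩ : ∃ k', k = k' + 1 := ⟨k - 1, by simp at hlen; omega⟩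
    rw [Function.iterate_succ_apply]
    refine ih _ k' ((mem_saturateStep dependencies S b).mpr (Or.inr ⟨a, hS, e⟩)) ?_
    simp at hlen; omega

-- ===== VERDICT (by name: the statement is the Claim_ definition above) =====
-- (the two ports in fact agree on every input; the Pre_ hypothesis only delimits where the
-- Python A returns instead of raising RecursionError, so the Lean proof does not need it)
theorem depends_on_humn_spec : Claim_equal_depends_on_humn := by
  intro m dependencies _ _
  unfold Spec_depends_on_humn depends_on_humn depends_on_humn_alt
  dsimp only
  rw [foldl_range_iterate, Bool.eq_iff_iff, PySem.Set.contains_iff]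
  constructor
  · intro h
    obtain ⟨xs, hc⟩ := dependsOnHumnFuel_sound dependencies _ m h
    obtain ⟨ys, hys, hlen⟩ := depChain_short dependencies hc
    exact iterate_complete dependencies hys _ _ (by simp [PySem.Set.mem_ofList]) hlen
  · intro h
    have hbase : ∀ y ∈ PySem.Set.ofList [m], ∃ xs, DepChain dependencies m y xs := by
      intro y hy
      have : y = m := by simpa [PySem.Set.mem_ofList] using hy
      exact ⟨[], this ▸ DepChain.nil _⟩
    obtain ⟨xs, hc⟩ := iterate_sound dependencies m _ _ hbase _ h
    obtain ⟨ys, hys, hlen⟩ := depChain_short dependencies hc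
    exact dependsOnHumnFuel_mono dependencies (by omega)
      (dependsOnHumnFuel_complete dependencies hys rfl)
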